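-- pv_equiv track=rewrite | github.com/danhimalplanet/advent | 2018/self/day08/solution.py | loop1
-- ===== SOURCE A (Python) =====
-- def loop1(input, start=0):
--     children = input[start]
--     mdcount = input[start+1]
--
--     if children == 0:
--         return sum(input[start+2:start+2+mdcount]), start+2+mdcount
--
--     newstart = start + 2
--     mdsum = 0
--     for child in range(children):
--         s, newstart = loop1(input, newstart)
--         mdsum += s
--
--     return mdsum + sum(input[newstart:newstart+mdcount]), newstart + mdcount
-- ===== SOURCE B (Python) =====
-- def loop1(input, start=0):
--     # Iterative re-implementation: an explicit stack of (children_remaining, mdcount)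
--     # frames replaces A's recursion; same reads, same slice-summing.
--     total = 0
--     c, m = input[start], input[start + 1]
--     stack = [(c, m)]
--     i = start + 2
--     while stack:
--         c, m = stack[-1]
--         if c > 0:
--             stack[-1] = (c - 1, m)
--             stack.append((input[i], input[i + 1]))
--             i += 2
--         else:
--             total += sum(input[i:i + m])
--             i += m
--             stack.pop()
--     return total, i
-- ===== Notes on version B (the rewrite author's own statement) =====
-- stated objective: alternative
-- what changed: A's recursive descent over the tree is replaced by a single iterative while loop driving an explicit stack of (children-remaining, metadata-count) frames; same header reads and slice-summing, no Python recursion.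
-- outside the precondition, e.g. on loop1([1, -2, 0, 0], 0): A returns (0, 2), B returns (0, 2); on loop1([1, 0, 0, 3, 7], 0): A returns (7, 7), B returns (7, 7); on loop1([1, 0, 0, 0], -4): A returns (0, 0), B returns (0, 0)
import Mathlib
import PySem

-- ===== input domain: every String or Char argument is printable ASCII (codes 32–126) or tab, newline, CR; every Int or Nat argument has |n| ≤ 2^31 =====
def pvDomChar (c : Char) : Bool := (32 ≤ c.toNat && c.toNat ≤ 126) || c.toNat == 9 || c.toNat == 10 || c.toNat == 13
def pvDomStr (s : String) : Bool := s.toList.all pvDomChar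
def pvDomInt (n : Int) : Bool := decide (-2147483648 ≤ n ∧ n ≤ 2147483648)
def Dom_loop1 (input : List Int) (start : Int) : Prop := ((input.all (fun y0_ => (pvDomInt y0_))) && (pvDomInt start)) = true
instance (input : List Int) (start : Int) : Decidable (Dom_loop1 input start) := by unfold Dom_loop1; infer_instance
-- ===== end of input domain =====

-- B replaces A's recursive descent by an explicit stack of (children-remaining, metadata-count)
-- frames (alternative decomposition, same cost; return value only — neither version mutates its input).

-- ===== PORT A =====
-- loop1Rec is A's recursion with a fuel guard making it total; inside Pre_loop1 the fuel
-- (input.length + 1) is never exhausted, so the guard never fires there.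
def loop1Rec (xs : List Int) : Nat → Int → Int × Int
  | 0, _ => (0, 0)
  | fu+1, start =>
    -- children = input[start]; mdcount = input[start+1]
    match PySem.List.pyGet? xs start, PySem.List.pyGet? xs (start+1) with
    | some children, some mdcount =>
      if children = 0 then
        ((PySem.List.slice xs (some (start+2)) (some (start+2+mdcount))).sum, start+2+mdcount)
      else
        -- for child in range(children): s, newstart = loop1(input, newstart); mdsum += s
        let st := (PySem.List.pyRange 0 children 1).foldl
          (fun (acc : Int × Int) _ =>
            let r := loop1Rec xs fu acc.2
            (acc.1 + r.1, r.2)) (0, start+2)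
        (st.1 + (PySem.List.slice xs (some st.2) (some (st.2+mdcount))).sum, st.2 + mdcount)
    | _, _ => (0, 0)

def loop1 (input : List Int) (start : Int) : Int × Int :=
  loop1Rec input (input.length + 1) start

-- ===== PORT B =====
-- B's while loop over the explicit stack (top = head), with the same fuel-style guard;
-- inside Pre_loop1 the fuel (2*input.length + 3) is never exhausted.
def loop1Go (xs : List Int) : Nat → List (Int × Int) → Int → Int → Int × Int
  | _, [], total, i => (total, i)
  | 0, _, _, _ => (0, 0)
  | fu+1, (c, m) :: rest, total, i =>
    if 0 < c then
      match PySem.List.pyGet? xs i, PySem.List.pyGet? xs (i+1) with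
      | some nc, some nm => loop1Go xs fu ((nc, nm) :: (c - 1, m) :: rest) total (i + 2)
      | _, _ => (0, 0)
    else
      loop1Go xs fu rest (total + (PySem.List.slice xs (some i) (some (i + m))).sum) (i + m)

def loop1_alt (input : List Int) (start : Int) : Int × Int :=
  match PySem.List.pyGet? input start, PySem.List.pyGet? input (start+1) with
  | some c, some m => loop1Go input (2 * input.length + 3) [(c, m)] 0 (start + 2)
  | _, _ => (0, 0)

-- ===== PRECONDITION & SPEC =====
-- pvEnd? xs i: the well-formed-tree grammar of the puzzle input, read off the data alone: the
-- header at i is in bounds, the metadata count is nonnegative, the child nodes are well-formed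
-- in sequence, and the metadata lies inside the list; returns the node's end position.
mutual
def pvEnd? (xs : List Int) (i : Nat) : Option {e : Nat // i + 2 ≤ e ∧ e ≤ xs.length ∧ i + 1 < xs.length} :=
  if h : i + 1 < xs.length then
    let m := xs.getD (i+1) 0
    if hm : 0 ≤ m then
      match pvSibs xs (xs.getD i 0).toNat (i+2) (by omega) with
      | some ⟨ec, hec⟩ =>
        if he : ec + m.toNat ≤ xs.length then some ⟨ec + m.toNat, by omega⟩ else none
      | none => none
    else none
  else none
termination_by (xs.length - i, 0)
decreasing_by simp only [Prod.lex_iff]; left; omega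

def pvSibs (xs : List Int) (k : Nat) (j : Nat) (hj : j ≤ xs.length) :
    Option {e : Nat // j ≤ e ∧ e ≤ xs.length} :=
  match k with
  | 0 => some ⟨j, le_refl _, hj⟩
  | k+1 =>
    match pvEnd? xs j with
    | some p =>
      (pvSibs xs k p.1 p.2.2.1).map (fun q => ⟨q.1, by have h1 := p.2; have h2 := q.2; omega⟩)
    | none => none
termination_by (xs.length - j, k + 1)
decreasing_by
  · exact Prod.Lex.right _ (by omega)
  · obtain ⟨e, h1, h2, h3⟩ := p
    exact Prod.Lex.left _ _ (by show xs.length - e < xs.length - j; omega)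
end

-- Pre_loop1: either the root node declares no children and its header is readable (A returns the
-- metadata sum at once, negative-index reads included), or start is nonnegative and the input
-- encodes a well-formed tree at start.  Pre_ excludes inputs on which A raises (IndexError /
-- RecursionError) and, as an artefact of the same grammar condition, a few inputs where A still
-- returns through accidents of its implementation: a node with a negative metadata count, a
-- metadata count overrunning the list, or a child header read through negative-index wraparound.
def Pre_loop1 (input : List Int) (start : Int) : Prop :=
  (PySem.Raise.InRange input.length start ∧ PySem.Raise.InRange input.length (start + 1) ∧
    (PySem.List.pyGet? input start).getD 0 ≤ 0)
  ∨ (0 ≤ start ∧ (pvEnd? input start.toNat).isSome)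

instance (input : List Int) (start : Int) : Decidable (Pre_loop1 input start) := by
  unfold Pre_loop1; infer_instance

def pvWitness_loop1 : List Int × Int := ([0, 3, 1, 2, 3], 0)

def Spec_loop1 (input : List Int) (start : Int) (out : Int × Int) : Prop := out = loop1_alt input start
instance (input : List Int) (start : Int) (out : Int × Int) : Decidable (Spec_loop1 input start out) := by
  unfold Spec_loop1; infer_instance

-- ===== CLAIM (what is proved, stated in full; the proofs are below) =====
def Claim_equal_loop1 : Prop := ∀ (input : List Int) (start : Int), Dom_loop1 input start → Pre_loop1 input start → Spec_loop1 input start (loop1 input start)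

-- ===== LEMMAS AND PROOFS =====


-- pvVal: the metadata sum of a well-formed node / sibling sequence, by the grammar's recursion.
mutual
def pvVal (xs : List Int) (i : Nat) : Int :=
  if h : i + 1 < xs.length then
    match pvSibs xs (xs.getD i 0).toNat (i+2) (by omega) with
    | some ⟨ec, _⟩ =>
      pvValSibs xs (xs.getD i 0).toNat (i+2) +
        (PySem.List.slice xs (some (ec : Int)) (some ((ec : Int) + xs.getD (i+1) 0))).sum
    | none => 0
  else 0
termination_by (xs.length - i, 0)
decreasing_by simp only [Prod.lex_iff]; left; omega

def pvValSibs (xs : List Int) (k : Nat) (j : Nat) : Int :=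
  match k with
  | 0 => 0
  | k+1 =>
    match pvEnd? xs j with
    | some p => pvVal xs j + pvValSibs xs k p.1
    | none => 0
termination_by (xs.length - j, k + 1)
decreasing_by
  · exact Prod.Lex.right _ (by omega)
  · obtain ⟨e, h1, h2, h3⟩ := p
    exact Prod.Lex.left _ _ (by show xs.length - e < xs.length - j; omega)
end

-- inversion of the grammar predicates, used throughout the proofs
theorem pvEnd?_inv {xs : List Int} {i : Nat}
    {e : {e : Nat // i + 2 ≤ e ∧ e ≤ xs.length ∧ i + 1 < xs.length}}
    (h : pvEnd? xs i = some e) :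
    ∃ (_hm : (0:Int) ≤ xs.getD (i+1) 0) (ec : Nat) (hec : i + 2 ≤ ec ∧ ec ≤ xs.length),
      pvSibs xs (xs.getD i 0).toNat (i+2) (by have := e.2.2.2; omega) = some ⟨ec, hec⟩ ∧
      ec + (xs.getD (i+1) 0).toNat ≤ xs.length ∧ e.1 = ec + (xs.getD (i+1) 0).toNat := by
  have h2 : i + 1 < xs.length := e.2.2.2
  rw [pvEnd?.eq_def, dif_pos h2] at h
  simp only at h
  split at h
  case isFalse => exact absurd h (by simp)
  rename_i hm
  split at h
  case h_2 => exact absurd h (by simp)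
  rename_i ec hec hS
  split at h
  case isFalse => exact absurd h (by simp)
  rename_i hle
  refine ⟨hm, ec, hec, hS, hle, ?_⟩
  cases h; rfl

theorem pvSibs_zero_inv {xs : List Int} {j : Nat} {hj : j ≤ xs.length}
    {ej : {e : Nat // j ≤ e ∧ e ≤ xs.length}} (h : pvSibs xs 0 j hj = some ej) :
    ej.1 = j := by
  rw [pvSibs.eq_def] at h
  cases h; rfl

theorem pvSibs_succ_inv {xs : List Int} {k j : Nat} {hj : j ≤ xs.length}
    {ej : {e : Nat // j ≤ e ∧ e ≤ xs.length}} (h : pvSibs xs (k+1) j hj = some ej) :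
    ∃ (p : {e : Nat // j + 2 ≤ e ∧ e ≤ xs.length ∧ j + 1 < xs.length})
      (_ : pvEnd? xs j = some p) (q : {e : Nat // p.1 ≤ e ∧ e ≤ xs.length}),
      pvSibs xs k p.1 p.2.2.1 = some q ∧ ej.1 = q.1 := by
  rw [pvSibs.eq_def] at h
  simp only at h
  split at h
  case h_2 => exact absurd h (by simp)
  rename_i p hE
  rcases hS : pvSibs xs k p.1 p.2.2.1 with _ | q
  · rw [hS] at h; exact absurd h (by simp)
  rw [hS] at h
  simp only [Option.map_some] at h
  cases h
  exact ⟨p, hE, q, hS, rfl⟩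

theorem pvVal_eq {xs : List Int} {i : Nat} {ec : Nat} {hec : i + 2 ≤ ec ∧ ec ≤ xs.length}
    (h2 : i + 1 < xs.length)
    (hS : pvSibs xs (xs.getD i 0).toNat (i+2) (by omega) = some ⟨ec, hec⟩) :
    pvVal xs i = pvValSibs xs (xs.getD i 0).toNat (i+2) +
      (PySem.List.slice xs (some (ec : Int)) (some ((ec : Int) + xs.getD (i+1) 0))).sum := by
  rw [pvVal.eq_def, dif_pos h2]
  simp only [hS]

theorem pvValSibs_succ {xs : List Int} {j : Nat} {k : Nat}
    {p : {e : Nat // j + 2 ≤ e ∧ e ≤ xs.length ∧ j + 1 < xs.length}}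
    (hE : pvEnd? xs j = some p) :
    pvValSibs xs (k+1) j = pvVal xs j + pvValSibs xs k p.1 := by
  conv_lhs => rw [pvValSibs.eq_def]
  simp only [hE]

theorem read_some {xs : List Int} {i : Nat} (h : i < xs.length) :
    PySem.List.pyGet? xs (i : Int) = some (xs.getD i 0) := by
  rw [PySem.List.pyGet?_natCast, List.getElem?_eq_getElem h, List.getD_eq_getElem _ _ h]

theorem read_some' {xs : List Int} {i : Nat} (h : i + 1 < xs.length) :
    PySem.List.pyGet? xs ((i : Int) + 1) = some (xs.getD (i+1) 0) := by
  rw [show ((i : Int) + 1) = ((i+1 : Nat) : Int) by push_cast; ring]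
  exact read_some h

mutual
theorem Anode (xs : List Int) (i : Nat) (e : {e : Nat // i + 2 ≤ e ∧ e ≤ xs.length ∧ i + 1 < xs.length})
    (h : pvEnd? xs i = some e) :
    ∀ fu : Nat, xs.length ≤ i + fu → loop1Rec xs fu (i : Int) = (pvVal xs i, (e.1 : Int)) := by
  intro fu hfu
  obtain ⟨hm, ec, hec, hS, hle, hev⟩ := pvEnd?_inv h
  have h2 : i + 1 < xs.length := e.2.2.2
  obtain ⟨fu₀, rfl⟩ : ∃ f, fu = f + 1 := ⟨fu - 1, by omega⟩
  rw [loop1Rec, read_some (by omega : i < xs.length), read_some' h2]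
  simp only
  rw [pvVal_eq h2 hS]
  by_cases hc : xs.getD i 0 = 0
  · rw [if_pos hc]
    have hec2 : ec = i + 2 := by
      rw [hc] at hS
      simp only [Int.toNat_zero] at hS
      exact pvSibs_zero_inv hS
    simp only [hc, Int.toNat_zero, pvValSibs, hev, hec2]
    rw [Prod.mk.injEq]
    constructor <;> push_cast [Int.toNat_of_nonneg hm] <;> ring_nf
  · rw [if_neg hc]
    have hfold := Asibs xs (xs.getD i 0).toNat (i+2) (by omega) ⟨ec, hec⟩ hS fu₀
      (by omega) (PySem.List.pyRange 0 (xs.getD i 0) 1)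
      (by rw [PySem.List.length_pyRange_one]; simp) 0
    simp only at hfold
    rw [show ((i : Int) + 2) = ((i + 2 : Nat) : Int) by push_cast; ring, hfold]
    simp only [zero_add, hev]
    rw [Prod.mk.injEq]
    constructor <;> push_cast [Int.toNat_of_nonneg hm] <;> ring_nf
termination_by (xs.length - i, 0)
decreasing_by exact Prod.Lex.left _ _ (by have := e.2.2.2; omega)

theorem Asibs (xs : List Int) (k j : Nat) (hj : j ≤ xs.length)
    (ej : {e : Nat // j ≤ e ∧ e ≤ xs.length}) (h : pvSibs xs k j hj = some ej) :
    ∀ fu : Nat, xs.length ≤ j + fu → ∀ l : List Int, l.length = k → ∀ t : Int,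
      l.foldl (fun (acc : Int × Int) _ =>
          let r := loop1Rec xs fu acc.2
          (acc.1 + r.1, r.2)) (t, (j : Int))
        = (t + pvValSibs xs k j, (ej.1 : Int)) := by
  intro fu hfu l hl t
  match k, l with
  | 0, [] =>
    rw [pvSibs_zero_inv h]
    simp [pvValSibs]
  | k+1, a :: l' =>
    obtain ⟨p, hE, q, hS, hejq⟩ := pvSibs_succ_inv h
    simp only [List.foldl_cons]
    rw [Anode xs j p hE fu (by omega)]
    simp only
    have hrest := Asibs xs k p.1 p.2.2.1 q hS fu (by have := p.2; omega) l'
      (by simpa using hl) (t + pvVal xs j)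
    rw [hrest, hejq, pvValSibs_succ hE, add_assoc]
termination_by (xs.length - j, k + 1)
decreasing_by
  · exact Prod.Lex.right _ (by omega)
  · have := p.2; exact Prod.Lex.left _ _ (by omega)
end

mutual
theorem Bnode (xs : List Int) (i : Nat) (e : {e : Nat // i + 2 ≤ e ∧ e ≤ xs.length ∧ i + 1 < xs.length})
    (h : pvEnd? xs i = some e) :
    ∀ (st : List (Int × Int)) (t : Int) (fu : Nat), e.1 ≤ i + fu + 1 →
      ∃ fu' : Nat, i + fu + 1 ≤ e.1 + fu' ∧
        loop1Go xs fu ((xs.getD i 0, xs.getD (i+1) 0) :: st) t ((i : Int) + 2)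
          = loop1Go xs fu' st (t + pvVal xs i) ((e.1 : Nat) : Int) := by
  intro st t fu hfu
  obtain ⟨hm, ec, hec, hS, hle, hev⟩ := pvEnd?_inv h
  have h2 : i + 1 < xs.length := e.2.2.2
  obtain ⟨fuc, hbnd, hrun⟩ := Bsibs xs (xs.getD i 0).toNat (i+2) (by omega) ⟨ec, hec⟩ hS
    (xs.getD i 0) (xs.getD (i+1) 0) rfl st t fu (by show ec ≤ i + 2 + fu; omega)
  have hmk : (⟨ec, hec⟩ : {e : Nat // i + 2 ≤ e ∧ e ≤ xs.length}).1 = ec := rfl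
  rw [hmk] at hbnd hrun
  obtain ⟨fuc', rfl⟩ : ∃ f, fuc = f + 1 := ⟨fuc - 1, by omega⟩
  refine ⟨fuc', by omega, ?_⟩
  rw [show ((i : Int) + 2) = ((i + 2 : Nat) : Int) by push_cast; ring, hrun, loop1Go]
  rw [if_neg (by omega : ¬ (0:Int) < xs.getD i 0 - ((xs.getD i 0).toNat : Int))]
  rw [pvVal_eq h2 hS, hev,
    show ((ec : Int) + xs.getD (i+1) 0) = ((ec + (xs.getD (i+1) 0).toNat : Nat) : Int) by
      push_cast [Int.toNat_of_nonneg hm]; ring, add_assoc]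
termination_by (xs.length - i, 0)
decreasing_by exact Prod.Lex.left _ _ (by have := e.2.2.2; omega)

theorem Bsibs (xs : List Int) (k j : Nat) (hj : j ≤ xs.length)
    (ej : {e : Nat // j ≤ e ∧ e ≤ xs.length}) (h : pvSibs xs k j hj = some ej) :
    ∀ (c mm : Int), c.toNat = k → ∀ (st : List (Int × Int)) (t : Int) (fu : Nat), ej.1 ≤ j + fu →
      ∃ fu' : Nat, j + fu ≤ ej.1 + fu' ∧
        loop1Go xs fu ((c, mm) :: st) t ((j : Nat) : Int)
          = loop1Go xs fu' ((c - (k : Int), mm) :: st) (t + pvValSibs xs k j) ((ej.1 : Nat) : Int) := by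
  intro c mm hck st t fu hfu
  match k with
  | 0 =>
    have hz := pvSibs_zero_inv h
    refine ⟨fu, by omega, ?_⟩
    rw [hz]
    simp [pvValSibs]
  | k+1 =>
    obtain ⟨p, hE, q, hS, hejq⟩ := pvSibs_succ_inv h
    have hp := p.2
    have hq := q.2
    obtain ⟨fu₀, rfl⟩ : ∃ f, fu = f + 1 := ⟨fu - 1, by omega⟩
    rw [loop1Go, if_pos (by omega : (0:Int) < c), read_some (by omega : j < xs.length), read_some' p.2.2.2]
    simp only
    obtain ⟨fu₁, hb1, hr1⟩ := Bnode xs j p hE ((c - 1, mm) :: st) t fu₀ (by omega)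
    obtain ⟨fu₂, hb2, hr2⟩ := Bsibs xs k p.1 p.2.2.1 q hS (c - 1) mm (by omega) st (t + pvVal xs j)
      fu₁ (by omega)
    refine ⟨fu₂, by omega, ?_⟩
    rw [hr1, hr2, hejq]
    rw [pvValSibs_succ hE,
      show c - 1 - (k : Int) = c - ((k + 1 : Nat) : Int) by push_cast; ring, add_assoc]
termination_by (xs.length - j, k + 1)
decreasing_by
  · exact Prod.Lex.right _ (by omega)
  · have := p.2; exact Prod.Lex.left _ _ (by omega)
end

theorem leaf_case (xs : List Int) (s : Int)
    (h1 : PySem.Raise.InRange xs.length s) (h2 : PySem.Raise.InRange xs.length (s + 1))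
    (h3 : (PySem.List.pyGet? xs s).getD 0 ≤ 0) :
    loop1 xs s = loop1_alt xs s := by
  rcases hc : PySem.List.pyGet? xs s with _ | c
  · exact absurd ((PySem.List.pyGet?_eq_none_iff xs s).mp hc) (by simpa using h1)
  rcases hm : PySem.List.pyGet? xs (s+1) with _ | m
  · exact absurd ((PySem.List.pyGet?_eq_none_iff xs (s+1)).mp hm) (by simpa using h2)
  have hc0 : c ≤ 0 := by rw [hc] at h3; simpa using h3
  unfold loop1 loop1_alt
  rw [show (2 * xs.length + 3) = (2 * xs.length + 2) + 1 from rfl]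
  simp only [loop1Rec, loop1Go, hc, hm]
  rw [if_neg (by omega : ¬ (0:Int) < c)]
  by_cases hz : c = 0
  · rw [if_pos hz]
    simp
  · rw [if_neg hz]
    rw [PySem.List.pyRange_one_eq_nil hc0]
    simp

theorem rec_case (xs : List Int) (i : Nat)
    (e : {e : Nat // i + 2 ≤ e ∧ e ≤ xs.length ∧ i + 1 < xs.length})
    (he : pvEnd? xs i = some e) :
    loop1 xs (i : Int) = loop1_alt xs (i : Int) := by
  have h2 : i + 1 < xs.length := e.2.2.2
  have hA := Anode xs i e he (xs.length + 1) (by omega)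
  obtain ⟨fu', _, hB⟩ := Bnode xs i e he [] 0 (2 * xs.length + 3) (by have := e.2; omega)
  unfold loop1 loop1_alt
  rw [read_some (by omega : i < xs.length), read_some' h2]
  simp only
  rw [hA, hB, loop1Go, zero_add]

-- ===== VERDICT (by name: the statement is the Claim_ definition above) =====
theorem loop1_spec : Claim_equal_loop1 := by
  intro input start _hdom hpre
  unfold Spec_loop1
  rcases hpre with ⟨h1, h2, h3⟩ | ⟨hs, hv⟩
  · exact leaf_case input start h1 h2 h3
  · obtain ⟨e, he⟩ := Option.isSome_iff_exists.mp hv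
    rw [show start = ((start.toNat : Nat) : Int) from (Int.toNat_of_nonneg hs).symm]
    exact rec_case input start.toNat e he
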